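-- pv_equiv track=rewrite | github.com/ZijieXiong/otsuThreshoulding | otsu.py | gray_to_quartcolor
-- ===== SOURCE A (Python) =====
-- import copy
--
-- def gray_to_quartcolor(grayscaleImage, threshold1, threshold2, threshold3):
--     quartColorImage = copy.deepcopy(grayscaleImage)
--     for row in range(len(quartColorImage)):
--         for col in range(len(quartColorImage[row])):
--             if quartColorImage[row][col] <= threshold1:
--                 quartColorImage[row][col] = 0
--             elif quartColorImage[row][col] <= threshold2:
--                 quartColorImage[row][col] = 85
--             elif quartColorImage[row][col] <= threshold3:
--                 quartColorImage[row][col] = 170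
--             else:
--                 quartColorImage[row][col] = 255
--     return quartColorImage
-- ===== SOURCE B (Python) =====
-- def gray_to_quartcolor(grayscaleImage, threshold1, threshold2, threshold3):
--     # Staged painting: start with an all-255 canvas, then three full passes,
--     # each painting its color wherever the pixel is <= its threshold,
--     # from the last threshold back to the first so earlier thresholds win.
--     out = [[255] * len(row) for row in grayscaleImage]
--     for t, c in ((threshold3, 170), (threshold2, 85), (threshold1, 0)):
--         for i, row in enumerate(grayscaleImage):
--             for j, px in enumerate(row):
--                 if px <= t:
--                     out[i][j] = c
--     return out
-- ===== Notes on version B (the rewrite author's own statement) =====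
-- stated objective: alternative
-- what changed: Replaces the single-pass four-way if/elif chain on a deepcopy with staged painting: an all-255 canvas is refined by three full-matrix overwrite passes (threshold3->170, threshold2->85, threshold1->0) applied back-to-front so earlier thresholds take precedence.
import Mathlib
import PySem

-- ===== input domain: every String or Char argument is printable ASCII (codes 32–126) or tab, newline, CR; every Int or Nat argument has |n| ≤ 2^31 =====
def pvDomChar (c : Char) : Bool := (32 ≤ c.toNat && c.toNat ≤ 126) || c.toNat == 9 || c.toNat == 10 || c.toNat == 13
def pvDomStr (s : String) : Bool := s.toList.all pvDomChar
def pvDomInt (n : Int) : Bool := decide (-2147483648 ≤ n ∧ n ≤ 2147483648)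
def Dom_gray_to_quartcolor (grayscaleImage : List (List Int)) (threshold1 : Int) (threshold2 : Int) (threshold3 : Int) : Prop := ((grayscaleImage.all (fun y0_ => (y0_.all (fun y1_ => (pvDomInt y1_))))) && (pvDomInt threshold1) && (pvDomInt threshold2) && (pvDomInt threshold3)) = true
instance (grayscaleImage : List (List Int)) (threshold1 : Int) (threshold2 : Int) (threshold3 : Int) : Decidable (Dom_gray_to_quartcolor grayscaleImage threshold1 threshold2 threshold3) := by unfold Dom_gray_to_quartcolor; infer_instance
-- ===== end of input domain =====

-- ===== PORT A =====
-- B replaces A's deepcopy + in-place if/elif chain by staged back-to-front painting (return value only; neither port mutates).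
def gray_to_quartcolor (grayscaleImage : List (List Int)) (threshold1 : Int) (threshold2 : Int) (threshold3 : Int) : List (List Int) :=
  grayscaleImage.map (fun row => row.map (fun px =>
    if px ≤ threshold1 then 0
    else if px ≤ threshold2 then 85
    else if px ≤ threshold3 then 170
    else 255))

-- ===== PORT B =====
-- one painting pass: overwrite out[i][j] with c wherever grayscaleImage[i][j] ≤ t
def pvPaint (g : List (List Int)) (out : List (List Int)) (t c : Int) : List (List Int) :=
  List.zipWith (fun grow orow => List.zipWith (fun px o => if px ≤ t then c else o) grow orow) g out

def gray_to_quartcolor_alt (grayscaleImage : List (List Int)) (threshold1 : Int) (threshold2 : Int) (threshold3 : Int) : List (List Int) :=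
  [(threshold3, (170 : Int)), (threshold2, 85), (threshold1, 0)].foldl
    (fun out tc => pvPaint grayscaleImage out tc.1 tc.2)
    (grayscaleImage.map (fun row => row.map (fun _ => (255 : Int))))

-- ===== PRECONDITION & SPEC =====
def Spec_gray_to_quartcolor (grayscaleImage : List (List Int)) (threshold1 : Int) (threshold2 : Int) (threshold3 : Int) (out : List (List Int)) : Prop := out = gray_to_quartcolor_alt grayscaleImage threshold1 threshold2 threshold3
instance (grayscaleImage : List (List Int)) (threshold1 : Int) (threshold2 : Int) (threshold3 : Int) (out : List (List Int)) : Decidable (Spec_gray_to_quartcolor grayscaleImage threshold1 threshold2 threshold3 out) := by unfold Spec_gray_to_quartcolor; infer_instance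

-- ===== CLAIM (what is proved, stated in full; the proofs are below) =====
def Claim_equal_gray_to_quartcolor : Prop := ∀ (grayscaleImage : List (List Int)) (threshold1 : Int) (threshold2 : Int) (threshold3 : Int), Dom_gray_to_quartcolor grayscaleImage threshold1 threshold2 threshold3 → Spec_gray_to_quartcolor grayscaleImage threshold1 threshold2 threshold3 (gray_to_quartcolor grayscaleImage threshold1 threshold2 threshold3)

-- ===== LEMMAS AND PROOFS =====
theorem zipWith_map_right {α β γ : Type} (f : α → β → γ) (h : α → β) (l : List α) :
    List.zipWith f l (l.map h) = l.map (fun a => f a (h a)) := by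
  induction l with
  | nil => rfl
  | cons a tl ih => simp [ih]

-- ===== VERDICT (by name: the statement is the Claim_ definition above) =====
theorem gray_to_quartcolor_spec : Claim_equal_gray_to_quartcolor := by
  intro g t1 t2 t3 _
  unfold Spec_gray_to_quartcolor gray_to_quartcolor gray_to_quartcolor_alt
  simp only [List.foldl, pvPaint]
  rw [zipWith_map_right, zipWith_map_right, zipWith_map_right]
  refine List.map_congr_left (fun row _ => ?_)
  rw [zipWith_map_right, zipWith_map_right, zipWith_map_right]
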